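-- pv_equiv track=rewrite | github.com/salzek/Password-Generator | Password Generator/helper.py | myUpper
-- ===== SOURCE A (Python) =====
-- def myUpper(string):
--     i = 0
--     for char_ in string:
--         if char_ in "i":
--             x = string[i:].replace(char_, "İ")
--             return (string[:i]+x).upper()
--         i += 1
--     else:
--         return string.upper()
-- ===== SOURCE B (Python) =====
-- def myUpper(string):
--     # Single character-building pass: emit 'İ' for 'i', per-char uppercase otherwise.
--     return ''.join('İ' if c == 'i' else c.upper() for c in string)
-- ===== Notes on version B (the rewrite author's own statement) =====
-- stated objective: simpler
-- what changed: Replaced A's scan-for-first-'i' plus slice/replace/whole-string-upper with a single per-character pass that emits 'İ' for 'i' and the character's uppercase otherwise.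
import Mathlib
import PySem

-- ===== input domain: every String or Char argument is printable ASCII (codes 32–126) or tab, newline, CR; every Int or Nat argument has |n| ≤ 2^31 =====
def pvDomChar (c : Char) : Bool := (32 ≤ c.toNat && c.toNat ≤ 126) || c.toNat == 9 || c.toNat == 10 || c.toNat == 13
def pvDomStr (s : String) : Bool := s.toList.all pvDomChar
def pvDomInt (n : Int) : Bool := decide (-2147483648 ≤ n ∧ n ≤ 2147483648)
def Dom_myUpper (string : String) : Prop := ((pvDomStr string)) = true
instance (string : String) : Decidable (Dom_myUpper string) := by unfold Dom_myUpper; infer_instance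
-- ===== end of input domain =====

-- B replaces A's find-first-'i' + slice/replace + whole-string upper with one per-character pass (objective: simpler).

-- ===== PORT A =====
-- the for-loop with running index i: on the first char with `char_ in "i"`, slice, replace and upper; else fall through
def myUpperGoA (s : List Char) : List Char → Nat → List Char
  | [], _ => PySem.Chars.upper s
  | c :: rest, i =>
    if PySem.Chars.isIn [c] ['i'] then
      PySem.Chars.upper (PySem.List.slice s none (some (i : Int)) ++
        PySem.Chars.replace (PySem.List.slice s (some (i : Int)) none) [c] ['İ'])
    else myUpperGoA s rest (i + 1)

def myUpper (string : String) : String :=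
  String.ofList (myUpperGoA string.toList string.toList 0)

-- ===== PORT B =====
def myUpper_alt (string : String) : String :=
  String.ofList (string.toList.map (fun c => if c = 'i' then 'İ' else PySem.Chars.upperChar c))

-- ===== PRECONDITION & SPEC =====
def Spec_myUpper (string : String) (out : String) : Prop := out = myUpper_alt string
instance (string : String) (out : String) : Decidable (Spec_myUpper string out) := by unfold Spec_myUpper; infer_instance

-- ===== CLAIM (what is proved, stated in full; the proofs are below) =====
def Claim_equal_myUpper : Prop := ∀ (string : String), Dom_myUpper string → Spec_myUpper string (myUpper string)

-- ===== LEMMAS AND PROOFS =====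

-- B's per-character function
def pvF (c : Char) : Char := if c = 'i' then 'İ' else PySem.Chars.upperChar c

lemma pv_isIn_single (c : Char) : PySem.Chars.isIn [c] ['i'] = true ↔ c = 'i' := by
  rw [PySem.Chars.isIn_iff_infix]
  constructor
  · intro h
    have := h.sublist.subset (List.mem_singleton_self c)
    simpa using this
  · rintro rfl; exact List.infix_rfl

-- replace with a single-char pattern is a map
lemma pv_replace_go_single (l : List Char) :
    ∀ (fuel : Nat) (acc : List Char), l.length ≤ fuel →
      PySem.Chars.replace.go ['i'] ['İ'] fuel l acc
        = acc.reverse ++ l.map (fun c => if c = 'i' then 'İ' else c) := by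
  induction l with
  | nil =>
    intro fuel acc _
    cases fuel <;> simp [PySem.Chars.replace.go]
  | cons c t ih =>
    intro fuel acc hle
    cases fuel with
    | zero => simp at hle
    | succ n =>
      by_cases hc : c = 'i'
      · subst hc
        rw [PySem.Chars.replace.go, if_pos (by simp [List.isPrefixOf])]
        simp only [List.length_cons, List.length_nil, Nat.zero_add, List.drop_succ_cons,
          List.drop_zero]
        rw [ih n _ (by simpa using Nat.le_of_succ_le_succ hle)]
        simp
      · rw [PySem.Chars.replace.go]
        rw [if_neg (by simp [List.isPrefixOf]; exact fun h => hc h.symm)]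
        rw [ih n _ (by simpa using Nat.le_of_succ_le_succ hle)]
        simp [hc]

lemma pv_replace_single (l : List Char) :
    PySem.Chars.replace l ['i'] ['İ'] = l.map (fun c => if c = 'i' then 'İ' else c) := by
  rw [PySem.Chars.replace]
  simp only [List.isEmpty_cons, if_neg Bool.false_ne_true]
  exact (pv_replace_go_single l l.length [] le_rfl).trans (by simp)

lemma pv_upperChar_dotless : PySem.Chars.upperChar 'İ' = 'İ' := by decide

-- loop invariant: rest is the suffix from i, and the prefix contains no 'i'
lemma pv_goA (s : List Char) :
    ∀ (rest : List Char) (i : Nat), rest = s.drop i → (∀ c ∈ s.take i, c ≠ 'i') →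
      myUpperGoA s rest i = s.map pvF := by
  intro rest
  induction rest with
  | nil =>
    intro i hdrop hpre
    have hlen : s.length ≤ i := by
      by_contra h
      push Not at h
      have := List.drop_eq_nil_iff.mp hdrop.symm
      omega
    have htake : s.take i = s := List.take_of_length_le hlen
    rw [htake] at hpre
    simp only [myUpperGoA, PySem.Chars.upper]
    exact List.map_congr_left (fun c hc => by simp [pvF, hpre c hc])
  | cons c rest ih =>
    intro i hdrop hpre
    have hi : i < s.length := by
      by_contra h
      push Not at h
      simp [List.drop_eq_nil_iff.mpr h] at hdrop
    have hget : s[i]? = some c := by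
      have h0 : (s.drop i)[0]? = some c := by rw [← hdrop]; rfl
      simpa using h0
    simp only [myUpperGoA]
    by_cases hc : c = 'i'
    · rw [if_pos ((pv_isIn_single c).mpr hc)]
      subst hc
      rw [PySem.List.slice_to_natCast, PySem.List.slice_from_natCast, pv_replace_single]
      simp only [PySem.Chars.upper, List.map_append, List.map_map]
      conv_rhs => rw [← List.take_append_drop i s, List.map_append]
      congr 1
      · exact List.map_congr_left (fun x hx => by simp [pvF, hpre x hx])
      · refine List.map_congr_left (fun x _ => ?_)
        by_cases hx : x = 'i' <;>
          simp [pvF, hx, Function.comp, pv_upperChar_dotless]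
    · rw [if_neg (by simp [pv_isIn_single, hc])]
      refine ih (i + 1) ?_ ?_
      · rw [← List.drop_drop, ← hdrop]; simp
      · intro x hx
        rw [List.take_add_one, hget] at hx
        simp only [List.mem_append, Option.toList_some, List.mem_singleton] at hx
        rcases hx with hx | rfl
        · exact hpre x hx
        · exact hc

-- ===== VERDICT (by name: the statement is the Claim_ definition above) =====
theorem myUpper_spec : Claim_equal_myUpper := by
  intro string _
  unfold Spec_myUpper myUpper myUpper_alt
  rw [pv_goA string.toList string.toList 0 (by simp) (by simp)]
  rfl
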